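-- pv_equiv track=rewrite | github.com/PigeonLabs/Every_day_BOJ | PyPy3/백준/Gold/1664. 주민등록번호/주민등록번호.py | process_an
-- ===== SOURCE A (Python) =====
-- def process_an(pattern, mod2):
--     n = len(pattern)
--     dp = [[0] * 19 for _ in range(n + 1)]
--     dp[0][0] = 1
--     for i in range(n):
--         coeff = mod2[i]
--         ch = pattern[i]
--         for r in range(19):
--             if dp[i][r] == 0:
--                 continue
--             if ch == 'X':
--                 for d in range(10):
--                     new_r = (r + coeff * d) % 19
--                     dp[i+1][new_r] += dp[i][r]
--             else:
--                 d = int(ch)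
--                 new_r = (r + coeff * d) % 19
--                 dp[i+1][new_r] += dp[i][r]
--     mod2l = dp[n]
--     valid_zero = True
--     for ch in pattern:
--         if ch != 'X' and ch != '0':
--             valid_zero = False
--             break
--     if valid_zero:
--         mod2l[0] -= 1
--     return mod2l
-- ===== SOURCE B (Python) =====
-- def process_an(pattern, mod2):
--     # First pass: separate the fixed-digit contribution (a single offset C)
--     # from the wildcard positions (their coefficients).
--     C = 0
--     xcoeffs = []
--     for i, ch in enumerate(pattern):
--         if ch == 'X':
--             xcoeffs.append(mod2[i])
--         else:
--             C = (C + mod2[i] * int(ch)) % 19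
--     # Second pass: convolve the per-wildcard residue distributions.
--     dist = [1] + [0] * 18
--     for coeff in xcoeffs:
--         pos = [0] * 19
--         for d in range(10):
--             pos[(coeff * d) % 19] += 1
--         dist = [sum(dist[s] * pos[(r - s) % 19] for s in range(19))
--                 for r in range(19)]
--     # Fold the fixed offset in as a cyclic shift.
--     res = [dist[(r - C) % 19] for r in range(19)]
--     if all(ch == 'X' or ch == '0' for ch in pattern):
--         res[0] -= 1
--     return res
-- ===== Notes on version B (the rewrite author's own statement) =====
-- stated objective: alternative
-- what changed: Replaces A's (n+1)x19 DP table, which interleaves digit shifts and wildcard spreads position by position, with a two-pass decomposition: one scan separates the fixed digits into a single modular offset C and collects the wildcard coefficients, then the wildcard residue distributions are combined by gather-style cyclic convolution and the offset is folded in as one final cyclic shift.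
import Mathlib
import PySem

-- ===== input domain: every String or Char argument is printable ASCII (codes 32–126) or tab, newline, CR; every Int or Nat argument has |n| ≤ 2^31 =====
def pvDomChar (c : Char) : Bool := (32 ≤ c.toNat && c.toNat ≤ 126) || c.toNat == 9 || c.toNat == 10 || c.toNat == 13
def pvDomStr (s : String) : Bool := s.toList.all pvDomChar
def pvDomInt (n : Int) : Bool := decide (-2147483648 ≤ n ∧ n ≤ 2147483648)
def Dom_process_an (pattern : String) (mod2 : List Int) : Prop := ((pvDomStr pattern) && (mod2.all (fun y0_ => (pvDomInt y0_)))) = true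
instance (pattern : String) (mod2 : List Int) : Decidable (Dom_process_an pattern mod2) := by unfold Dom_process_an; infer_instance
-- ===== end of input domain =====

-- B separates the fixed digits into one modular offset and convolves the wildcard
-- distributions, instead of A's row-by-row DP table (objective: alternative decomposition).

-- ===== PORT A =====
def pvIncr (w : List Int) (k : Nat) (x : Int) : List Int := w.modify k (· + x)

def pvValidZero : List Char → Bool
  | [] => true
  | ch :: rest => if ch ≠ 'X' ∧ ch ≠ '0' then false else pvValidZero rest

def process_an (pattern : String) (mod2 : List Int) : List Int :=
  let n := pattern.toList.length
  let dp0 : List (List Int) :=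
    ((List.range (n + 1)).map (fun _ => List.replicate 19 (0 : Int))).modify 0
      (fun row => row.set 0 1)
  let dp := (List.range n).foldl (fun dp (i : Nat) =>
    let coeff := (PySem.List.pyGet? mod2 (i : Int)).getD 0
    let ch := (PySem.List.pyGet? pattern.toList (i : Int)).getD ' '
    (List.range 19).foldl (fun dp (r : Nat) =>
      if (dp.getD i []).getD r 0 == 0 then dp
      else if ch == 'X' then
        (List.range 10).foldl (fun dp (d : Nat) =>
          dp.modify (i + 1) (fun row =>
            pvIncr row (PySem.Int.mod ((r : Int) + coeff * (d : Int)) 19).toNat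
              ((dp.getD i []).getD r 0))) dp
      else
        dp.modify (i + 1) (fun row =>
          pvIncr row (PySem.Int.mod ((r : Int) + coeff * ((PySem.Int.ofStr? (String.ofList [ch])).getD 0)) 19).toNat
            ((dp.getD i []).getD r 0))) dp) dp0
  let mod2l := dp.getD n []
  if pvValidZero pattern.toList then mod2l.modify 0 (· - 1) else mod2l

-- ===== PORT B =====
def process_an_alt (pattern : String) (mod2 : List Int) : List Int :=
  let st := (PySem.List.enumerate pattern.toList 0).foldl (fun (st : Int × List Int) p =>
      if p.2 == 'X' then (st.1, st.2 ++ [(PySem.List.pyGet? mod2 p.1).getD 0])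
      else (PySem.Int.mod (st.1 + ((PySem.List.pyGet? mod2 p.1).getD 0) *
              ((PySem.Int.ofStr? (String.ofList [p.2])).getD 0)) 19, st.2))
    ((0 : Int), ([] : List Int))
  let dist := st.2.foldl (fun dist coeff =>
      let pos := (List.range 10).foldl (fun pos d =>
          pos.modify (PySem.Int.mod (coeff * (d : Int)) 19).toNat (· + 1))
        (List.replicate 19 (0 : Int))
      (List.range 19).map (fun (r : Nat) =>
        ((List.range 19).map (fun (s : Nat) =>
          dist.getD s 0 * pos.getD (PySem.Int.mod ((r : Int) - (s : Int)) 19).toNat 0)).sum))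
    ((1 : Int) :: List.replicate 18 0)
  let res := (List.range 19).map (fun (r : Nat) =>
    dist.getD (PySem.Int.mod ((r : Int) - st.1) 19).toNat 0)
  if pattern.toList.all (fun ch => ch == 'X' || ch == '0') then res.modify 0 (· - 1) else res

-- ===== PRECONDITION & SPEC =====
-- Pre_ excludes exactly the inputs where Python A raises: mod2 shorter than pattern
-- (IndexError) or a pattern character that is neither 'X' nor a digit (ValueError in int(ch)).
def Pre_process_an (pattern : String) (mod2 : List Int) : Prop :=
  (pattern.toList.all (fun ch => ch == 'X' || PySem.Chars.isdigit ch)) = true ∧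
  pattern.toList.length ≤ mod2.length
instance (pattern : String) (mod2 : List Int) : Decidable (Pre_process_an pattern mod2) := by
  unfold Pre_process_an; infer_instance

def pvWitness_process_an : String × List Int := ("X3", [2, -5])

def Spec_process_an (pattern : String) (mod2 : List Int) (out : List Int) : Prop := out = process_an_alt pattern mod2
instance (pattern : String) (mod2 : List Int) (out : List Int) : Decidable (Spec_process_an pattern mod2 out) := by unfold Spec_process_an; infer_instance

-- ===== CLAIM (what is proved, stated in full; the proofs are below) =====
def Claim_equal_process_an : Prop := ∀ (pattern : String) (mod2 : List Int), Dom_process_an pattern mod2 → Pre_process_an pattern mod2 → Spec_process_an pattern mod2 (process_an pattern mod2)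


-- ===== LEMMAS AND PROOFS =====

-- proof-side abbreviations for the per-index lookups both ports perform
def pvCoeffAt (ms : List Int) (i : Nat) : Int := (PySem.List.pyGet? ms (i : Int)).getD 0
def pvChAt (cs : List Char) (i : Nat) : Char := (PySem.List.pyGet? cs (i : Int)).getD ' '
def pvDv (ch : Char) : Int := (PySem.Int.ofStr? (String.ofList [ch])).getD 0
def pvIdx (x : Int) : Nat := (PySem.Int.mod x 19).toNat
def pvZ : List Int := List.replicate 19 (0 : Int)
def pvRow0 : List Int := (List.replicate 19 (0 : Int)).set 0 1

-- the row-level DP step of A (one position, table abstracted away)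
def pvRowInner (c : Int) (ch : Char) (prev : List Int) (row : List Int) (r : Nat) : List Int :=
  if prev.getD r 0 == 0 then row
  else if ch == 'X' then
    (List.range 10).foldl (fun row (d : Nat) =>
      pvIncr row (pvIdx ((r : Int) + c * (d : Int))) (prev.getD r 0)) row
  else pvIncr row (pvIdx ((r : Int) + c * pvDv ch)) (prev.getD r 0)

def pvRowStep (c : Int) (ch : Char) (prev : List Int) : List Int :=
  (List.range 19).foldl (pvRowInner c ch prev) pvZ

def pvRowA (ms : List Int) (cs : List Char) : Nat → List Int
  | 0 => pvRow0
  | j + 1 => pvRowStep (pvCoeffAt ms j) (pvChAt cs j) (pvRowA ms cs j)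

-- abstract residue-distribution semantics
def pvToFun (v : List Int) : ZMod 19 → Int := fun t => v.getD t.val 0
def pvShift (c : Int) (v : ZMod 19 → Int) : ZMod 19 → Int := fun t => v (t - (c : ZMod 19))
def pvConv (k : Int) (v : ZMod 19 → Int) : ZMod 19 → Int :=
  fun t => ∑ d ∈ Finset.range 10, v (t - ((k * (d : Int) : Int) : ZMod 19))
def pvStep (p : Int × Char) (v : ZMod 19 → Int) : ZMod 19 → Int :=
  if p.2 = 'X' then pvConv p.1 v else pvShift (p.1 * pvDv p.2) v
def pvSteps (P : List (Int × Char)) (v : ZMod 19 → Int) : ZMod 19 → Int :=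
  P.foldl (fun v p => pvStep p v) v
def pvConvs (ks : List Int) (v : ZMod 19 → Int) : ZMod 19 → Int :=
  ks.foldl (fun v k => pvConv k v) v
def pvCof : List (Int × Char) → Int
  | [] => 0
  | p :: l => (if p.2 = 'X' then 0 else p.1 * pvDv p.2) + pvCof l
def pvXof : List (Int × Char) → List Int
  | [] => []
  | p :: l => if p.2 = 'X' then p.1 :: pvXof l else pvXof l
def pvPfx (ms : List Int) (cs : List Char) (j : Nat) : List (Int × Char) :=
  (List.range j).map (fun i => (pvCoeffAt ms i, pvChAt cs i))

-- basic index arithmetic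
lemma pvIdx_lt (x : Int) : pvIdx x < 19 := by
  have h1 := PySem.Int.mod_nonneg x (b := 19) (by norm_num)
  have h2 := PySem.Int.mod_lt x (b := 19) (by norm_num)
  unfold pvIdx; omega

lemma pvCastMod (a : Int) : ((PySem.Int.mod a 19 : Int) : ZMod 19) = (a : ZMod 19) := by
  rw [PySem.Int.mod_eq_emod_of_pos (by norm_num)]
  simp [ZMod.intCast_eq_intCast_iff', Int.emod_emod_of_dvd]

lemma pvVal_intCast (x : Int) : (ZMod.val (x : ZMod 19)) = pvIdx x := by
  have h := ZMod.val_intCast (n := 19) x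
  unfold pvIdx
  rw [PySem.Int.mod_eq_emod_of_pos (by norm_num)]
  have h1 : 0 ≤ x % 19 := Int.emod_nonneg x (by norm_num)
  omega

lemma pvIdx_cast (x : Int) : ((pvIdx x : Nat) : ZMod 19) = ((x : Int) : ZMod 19) := by
  rw [← pvVal_intCast, ZMod.natCast_zmod_val]

lemma pvGetD_idx (v : List Int) (x : Int) : v.getD (pvIdx x) 0 = pvToFun v ((x : Int) : ZMod 19) := by
  unfold pvToFun; rw [pvVal_intCast]

lemma pvToFun_cast_val (v : List Int) (t : ZMod 19) : pvToFun v t = v.getD t.val 0 := rfl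

lemma pvNatCast_eq_iff (k : Nat) (hk : k < 19) (t : ZMod 19) :
    (((k : Nat) : ZMod 19) = t) ↔ t.val = k := by
  constructor
  · intro h; rw [← h, ZMod.val_cast_of_lt hk]
  · intro h; rw [← h, ZMod.natCast_zmod_val]

-- pvIncr effect on entries
lemma pvIncr_length (w : List Int) (k : Nat) (x : Int) : (pvIncr w k x).length = w.length := by
  unfold pvIncr; simp

lemma pvIncr_getD (w : List Int) (k : Nat) (x : Int) (hk : k < w.length) (j : Nat) :
    (pvIncr w k x).getD j 0 = w.getD j 0 + (if j = k then x else 0) := by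
  unfold pvIncr
  rw [List.getD_eq_getElem?_getD, List.getD_eq_getElem?_getD, List.getElem?_modify]
  by_cases h : j < w.length
  · rw [List.getElem?_eq_getElem h]
    by_cases hjk : j = k
    · subst hjk; simp
    · have hkj : k ≠ j := Ne.symm hjk
      simp [hjk, hkj]
  · rw [List.getElem?_eq_none (by omega)]
    have hkj : k ≠ j := by omega
    have hjk : j ≠ k := by omega
    simp [hkj, hjk]

-- selecting the unique residue representative in range 19
lemma pvPick (f : Nat → Int) (u : ZMod 19) :
    ∑ r ∈ Finset.range 19, (if ((r : Nat) : ZMod 19) = u then f r else 0) = f u.val := by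
  rw [Finset.sum_eq_single_of_mem u.val (Finset.mem_range.mpr (ZMod.val_lt u))]
  · simp
  · intro r hr hne
    have hlt : r < 19 := Finset.mem_range.mp hr
    have : ((r : Nat) : ZMod 19) ≠ u := fun h => hne (((pvNatCast_eq_iff r hlt u).mp h).symm)
    simp [this]

-- a batch of increments at residue indices, seen through pvToFun
lemma pvFoldIncr (m : Nat) (g : Nat → Nat) (hg : ∀ d, g d < 19) (x : Int)
    (w : List Int) (hw : w.length = 19) :
    (((List.range m).foldl (fun w d => pvIncr w (g d) x) w).length = 19) ∧
    ∀ t, pvToFun ((List.range m).foldl (fun w d => pvIncr w (g d) x) w) t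
      = pvToFun w t + ∑ d ∈ Finset.range m, (if ((g d : Nat) : ZMod 19) = t then x else 0) := by
  induction m with
  | zero => simp [hw]
  | succ m ih =>
    obtain ⟨ihl, ihf⟩ := ih
    rw [List.range_succ]
    constructor
    · rw [List.foldl_append, List.foldl_cons, List.foldl_nil, pvIncr_length, ihl]
    · intro t
      rw [List.foldl_append, List.foldl_cons, List.foldl_nil]
      rw [pvToFun_cast_val, pvIncr_getD _ _ _ (by rw [ihl]; exact hg m)]
      rw [← pvToFun_cast_val, ihf t, Finset.sum_range_succ (f := fun d => if ((g d : Nat) : ZMod 19) = t then x else 0)]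
      by_cases h : t.val = g m
      · rw [if_pos h, if_pos ((pvNatCast_eq_iff _ (hg m) t).mpr h)]; ring
      · rw [if_neg h, if_neg (fun hh => h ((pvNatCast_eq_iff _ (hg m) t).mp hh))]; ring

def pvContrib (c : Int) (ch : Char) (prev : List Int) (r : Nat) (t : ZMod 19) : Int :=
  if ch = 'X' then
    ∑ d ∈ Finset.range 10, (if (((r : Int) + c * (d : Int) : Int) : ZMod 19) = t then prev.getD r 0 else 0)
  else (if (((r : Int) + c * pvDv ch : Int) : ZMod 19) = t then prev.getD r 0 else 0)

lemma pvRowInner_length (c : Int) (ch : Char) (prev : List Int) (w : List Int)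
    (hw : w.length = 19) (m : Nat) : (pvRowInner c ch prev w m).length = 19 := by
  unfold pvRowInner
  split
  · exact hw
  · split
    · exact (pvFoldIncr 10 _ (fun d => pvIdx_lt _) _ _ hw).1
    · rw [pvIncr_length]; exact hw

lemma pvRowInner_toFun (c : Int) (ch : Char) (prev : List Int) (w : List Int)
    (hw : w.length = 19) (m : Nat) (t : ZMod 19) :
    pvToFun (pvRowInner c ch prev w m) t = pvToFun w t + pvContrib c ch prev m t := by
  unfold pvRowInner pvContrib
  by_cases h0 : prev.getD m 0 = 0
  · rw [if_pos (by simpa using h0)]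
    have h0' : prev[m]?.getD 0 = 0 := by rw [← List.getD_eq_getElem?_getD]; exact h0
    split <;> simp [h0']
  · rw [if_neg (by simpa using h0)]
    by_cases hX : ch = 'X'
    · rw [if_pos (by simpa using hX), if_pos hX]
      rw [(pvFoldIncr 10 (fun d => pvIdx ((m : Int) + c * (d : Int)))
        (fun d => pvIdx_lt _) (prev.getD m 0) w hw).2 t]
      simp only [pvIdx_cast]
    · rw [if_neg (by simpa using hX), if_neg hX]
      rw [pvToFun_cast_val, pvIncr_getD _ _ _ (by rw [hw]; exact pvIdx_lt _), ← pvToFun_cast_val]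
      by_cases h : t.val = pvIdx ((m : Int) + c * pvDv ch)
      · rw [if_pos h, if_pos (by rw [← pvIdx_cast]; exact (pvNatCast_eq_iff _ (pvIdx_lt _) t).mpr h)]
      · rw [if_neg h, if_neg (by rw [← pvIdx_cast]; exact fun hh => h ((pvNatCast_eq_iff _ (pvIdx_lt _) t).mp hh))]

lemma pvRowFold (c : Int) (ch : Char) (prev : List Int) (m : Nat) (w : List Int) (hw : w.length = 19) :
    (((List.range m).foldl (pvRowInner c ch prev) w).length = 19) ∧
    ∀ t, pvToFun ((List.range m).foldl (pvRowInner c ch prev) w) t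
      = pvToFun w t + ∑ r ∈ Finset.range m, pvContrib c ch prev r t := by
  induction m with
  | zero => simp [hw]
  | succ m ih =>
    obtain ⟨ihl, ihf⟩ := ih
    rw [List.range_succ, List.foldl_append, List.foldl_cons, List.foldl_nil]
    refine ⟨pvRowInner_length c ch prev _ ihl m, fun t => ?_⟩
    rw [pvRowInner_toFun c ch prev _ ihl m t, ihf t,
      Finset.sum_range_succ (f := fun r => pvContrib c ch prev r t)]
    ring

lemma pvToFun_pvZ : ∀ t, pvToFun pvZ t = 0 := by decide

-- core semantics of one DP row step
lemma pvRowStep_spec (c : Int) (ch : Char) (prev : List Int) :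
    (pvRowStep c ch prev).length = 19 ∧
    pvToFun (pvRowStep c ch prev) = pvStep (c, ch) (pvToFun prev) := by
  obtain ⟨hl, hf⟩ := pvRowFold c ch prev 19 pvZ (by simp [pvZ])
  refine ⟨hl, funext fun t => ?_⟩
  rw [show pvRowStep c ch prev = (List.range 19).foldl (pvRowInner c ch prev) pvZ from rfl]
  rw [hf t, pvToFun_pvZ t, zero_add]
  unfold pvStep pvContrib
  by_cases hX : ch = 'X'
  · simp only [if_pos hX]
    rw [Finset.sum_comm]
    unfold pvConv
    refine Finset.sum_congr rfl (fun d _ => ?_)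
    have : ∀ r : Nat, ((((r : Int) + c * (d : Int) : Int) : ZMod 19) = t)
        = (((r : Nat) : ZMod 19) = t - ((c * (d : Int) : Int) : ZMod 19)) := by
      intro r
      rw [eq_iff_iff]
      push_cast
      constructor
      · intro h; rw [← h]; ring
      · intro h; rw [h]; ring
    simp only [this]
    rw [pvPick (fun r => prev.getD r 0)]
    rfl
  · simp only [if_neg hX]
    unfold pvShift
    have : ∀ r : Nat, ((((r : Int) + c * pvDv ch : Int) : ZMod 19) = t)
        = (((r : Nat) : ZMod 19) = t - ((c * pvDv ch : Int) : ZMod 19)) := by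
      intro r
      rw [eq_iff_iff]
      push_cast
      constructor
      · intro h; rw [← h]; ring
      · intro h; rw [h]; ring
    simp only [this]
    rw [pvPick (fun r => prev.getD r 0)]
    rfl

-- getD through List.modify
lemma pvGetD_modify_ne {a : Type} (l : List a) (i j : Nat) (f : a → a) (d : a) (h : i ≠ j) :
    (l.modify i f).getD j d = l.getD j d := by
  rw [List.getD_eq_getElem?_getD, List.getD_eq_getElem?_getD, List.getElem?_modify]
  cases l[j]? <;> simp [h]

lemma pvGetD_modify_self {a : Type} (l : List a) (i : Nat) (f : a → a) (d : a) (h : i < l.length) :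
    (l.modify i f).getD i d = f (l.getD i d) := by
  rw [List.getD_eq_getElem?_getD, List.getD_eq_getElem?_getD, List.getElem?_modify,
    List.getElem?_eq_getElem h]
  simp

lemma pvModify_modify {a : Type} (l : List a) (i : Nat) (f g : a → a) :
    (l.modify i f).modify i g = l.modify i (fun x => g (f x)) := by
  apply List.ext_getElem?
  intro j
  simp only [List.getElem?_modify]
  cases l[j]? <;> by_cases h : i = j <;> simp [h]

-- the inner d-loop of A only touches row i+1 and reads row i
lemma pvT1 (m i r : Nat) (g : Nat → Nat) (dp : List (List Int)) :
    (List.range m).foldl (fun dp (d : Nat) =>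
        dp.modify (i + 1) (fun row => pvIncr row (g d) ((dp.getD i []).getD r 0))) dp
    = dp.modify (i + 1) (fun row =>
        (List.range m).foldl (fun row (d : Nat) => pvIncr row (g d) ((dp.getD i []).getD r 0)) row) := by
  induction m with
  | zero => exact (List.modify_id _ _).symm
  | succ m ih =>
    simp only [List.range_succ (n := m), List.foldl_append, List.foldl_cons, List.foldl_nil]
    rw [ih, pvGetD_modify_ne _ _ _ _ _ (by omega), pvModify_modify]

-- the r-loop of A, with the table abstracted to one modify of row i+1
lemma pvT2 (m i : Nat) (c : Int) (ch : Char) (dp : List (List Int)) :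
    (List.range m).foldl (fun dp (r : Nat) =>
        if (dp.getD i []).getD r 0 == 0 then dp
        else if ch == 'X' then
          (List.range 10).foldl (fun dp (d : Nat) =>
            dp.modify (i + 1) (fun row =>
              pvIncr row (pvIdx ((r : Int) + c * (d : Int))) ((dp.getD i []).getD r 0))) dp
        else
          dp.modify (i + 1) (fun row =>
            pvIncr row (pvIdx ((r : Int) + c * pvDv ch)) ((dp.getD i []).getD r 0))) dp
    = dp.modify (i + 1) (fun row =>
        (List.range m).foldl (pvRowInner c ch (dp.getD i [])) row) := by
  induction m with
  | zero => exact (List.modify_id _ _).symm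
  | succ m ih =>
    simp only [List.range_succ (n := m), List.foldl_append, List.foldl_cons, List.foldl_nil]
    rw [ih, pvGetD_modify_ne _ _ _ _ _ (by omega)]
    by_cases h0 : ((dp.getD i []).getD m 0 == 0) = true
    · rw [if_pos h0]
      have hskip : ∀ row : List Int,
          pvRowInner c ch (dp.getD i []) row m = row := by
        intro row; unfold pvRowInner; rw [if_pos h0]
      simp only [hskip]
    · rw [if_neg h0]
      by_cases hX : (ch == 'X') = true
      · rw [if_pos hX, pvT1, pvGetD_modify_ne _ _ _ _ _ (by omega), pvModify_modify]
        have hst : ∀ row : List Int, pvRowInner c ch (dp.getD i []) row m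
            = (List.range 10).foldl (fun row (d : Nat) =>
                pvIncr row (pvIdx ((m : Int) + c * (d : Int))) ((dp.getD i []).getD m 0)) row := by
          intro row; unfold pvRowInner; rw [if_neg h0, if_pos hX]
        simp only [hst]
      · rw [if_neg hX, pvModify_modify]
        have hst : ∀ row : List Int, pvRowInner c ch (dp.getD i []) row m
            = pvIncr row (pvIdx ((m : Int) + c * pvDv ch)) ((dp.getD i []).getD m 0) := by
          intro row; unfold pvRowInner; rw [if_neg h0, if_neg hX]
        simp only [hst]

-- A's fold body over the table, named for the invariant proof
def pvBody (ms : List Int) (cs : List Char) (dp : List (List Int)) (i : Nat) : List (List Int) :=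
  (List.range 19).foldl (fun dp (r : Nat) =>
    if (dp.getD i []).getD r 0 == 0 then dp
    else if pvChAt cs i == 'X' then
      (List.range 10).foldl (fun dp (d : Nat) =>
        dp.modify (i + 1) (fun row =>
          pvIncr row (pvIdx ((r : Int) + pvCoeffAt ms i * (d : Int))) ((dp.getD i []).getD r 0))) dp
    else
      dp.modify (i + 1) (fun row =>
        pvIncr row (pvIdx ((r : Int) + pvCoeffAt ms i * pvDv (pvChAt cs i))) ((dp.getD i []).getD r 0))) dp

def pvDp0 (n : Nat) : List (List Int) :=
  ((List.range (n + 1)).map (fun _ => List.replicate 19 (0 : Int))).modify 0 (fun row => row.set 0 1)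

lemma pvDp0_length (n : Nat) : (pvDp0 n).length = n + 1 := by
  unfold pvDp0; simp

lemma pvDp0_getD (n j : Nat) (hj : j ≤ n) :
    (pvDp0 n).getD j [] = if j = 0 then pvRow0 else pvZ := by
  unfold pvDp0
  by_cases h : j = 0
  · subst h
    rw [pvGetD_modify_self _ _ _ _ (by simp)]
    rw [List.getD_eq_getElem?_getD, List.getElem?_map, List.getElem?_range (by omega)]
    simp [pvRow0]
  · rw [pvGetD_modify_ne _ _ _ _ _ (Ne.symm h), if_neg h]
    rw [List.getD_eq_getElem?_getD, List.getElem?_map, List.getElem?_range (by omega)]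
    simp [pvZ]

-- the table invariant: after k steps row j holds pvRowA j for j ≤ k, zeros beyond
lemma pvTableInv (ms : List Int) (cs : List Char) (k : Nat) (hk : k ≤ cs.length) :
    ((List.range k).foldl (pvBody ms cs) (pvDp0 cs.length)).length = cs.length + 1 ∧
    ∀ j, j ≤ cs.length →
      ((List.range k).foldl (pvBody ms cs) (pvDp0 cs.length)).getD j []
        = if j ≤ k then pvRowA ms cs j else pvZ := by
  induction k with
  | zero =>
    refine ⟨pvDp0_length _, fun j hj => ?_⟩
    rw [List.range_zero, List.foldl_nil, pvDp0_getD _ _ hj]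
    by_cases h : j = 0
    · subst h; simp [pvRowA]
    · rw [if_neg h, if_neg (by omega)]
  | succ k ih =>
    obtain ⟨ihl, ihf⟩ := ih (by omega)
    set dpk := (List.range k).foldl (pvBody ms cs) (pvDp0 cs.length) with hdpk
    rw [List.range_succ, List.foldl_append, List.foldl_cons, List.foldl_nil]
    have hbody : pvBody ms cs dpk k = dpk.modify (k + 1) (fun row =>
        (List.range 19).foldl (pvRowInner (pvCoeffAt ms k) (pvChAt cs k) (dpk.getD k [])) row) :=
      pvT2 19 k (pvCoeffAt ms k) (pvChAt cs k) dpk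
    have hrowk : dpk.getD k [] = pvRowA ms cs k := by
      rw [ihf k (by omega), if_pos (le_refl k)]
    constructor
    · rw [hbody]; simp [ihl]
    · intro j hj
      rw [hbody]
      by_cases h : j = k + 1
      · subst h
        rw [pvGetD_modify_self _ _ _ _ (by omega)]
        rw [ihf (k+1) hj, if_neg (by omega), if_pos (le_refl _)]
        rw [hrowk]
        rfl
      · rw [pvGetD_modify_ne _ _ _ _ _ (Ne.symm h), ihf j hj]
        by_cases h2 : j ≤ k
        · rw [if_pos h2, if_pos (by omega)]
        · rw [if_neg h2, if_neg (by omega)]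

-- A-side semantics: row j is the abstract fold over the first j positions
lemma pvRowA_spec (ms : List Int) (cs : List Char) (j : Nat) :
    (pvRowA ms cs j).length = 19 ∧
    pvToFun (pvRowA ms cs j) = pvSteps (pvPfx ms cs j) (pvToFun pvRow0) := by
  induction j with
  | zero => exact ⟨by simp [pvRowA, pvRow0], by simp [pvPfx, pvSteps, pvRowA]⟩
  | succ j ih =>
    obtain ⟨ihl, ihf⟩ := ih
    have hstep := pvRowStep_spec (pvCoeffAt ms j) (pvChAt cs j) (pvRowA ms cs j)
    refine ⟨hstep.1, ?_⟩
    rw [show pvRowA ms cs (j+1) = pvRowStep (pvCoeffAt ms j) (pvChAt cs j) (pvRowA ms cs j) from rfl]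
    rw [hstep.2, ihf]
    unfold pvPfx
    rw [List.range_succ, List.map_append]
    unfold pvSteps
    rw [List.foldl_append]
    rfl

-- abstract commutation: fixed-digit shifts move past wildcard convolutions
lemma pvConv_shift (k c : Int) (v : ZMod 19 → Int) :
    pvConv k (pvShift c v) = pvShift c (pvConv k v) := by
  funext t
  unfold pvConv pvShift
  refine Finset.sum_congr rfl (fun d _ => ?_)
  ring_nf

lemma pvShift_shift (a b : Int) (v : ZMod 19 → Int) :
    pvShift a (pvShift b v) = pvShift (b + a) v := by
  funext t
  unfold pvShift
  push_cast
  ring_nf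

lemma pvConvs_shift (ks : List Int) (c : Int) (v : ZMod 19 → Int) :
    pvConvs ks (pvShift c v) = pvShift c (pvConvs ks v) := by
  induction ks generalizing v with
  | nil => rfl
  | cons k ks ih =>
    show pvConvs ks (pvConv k (pvShift c v)) = pvShift c (pvConvs ks (pvConv k v))
    rw [pvConv_shift, ih]

lemma pvSteps_decompose (P : List (Int × Char)) :
    ∀ v, pvSteps P v = pvShift (pvCof P) (pvConvs (pvXof P) v) := by
  induction P with
  | nil =>
    intro v
    show v = pvShift 0 v
    funext t
    unfold pvShift
    norm_num
  | cons p l ih =>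
    intro v
    by_cases hX : p.2 = 'X'
    · show pvSteps l (pvStep p v) = _
      rw [ih (pvStep p v)]
      unfold pvStep
      rw [if_pos hX]
      rw [show pvCof (p :: l) = (if p.2 = 'X' then 0 else p.1 * pvDv p.2) + pvCof l from rfl,
        show pvXof (p :: l) = (if p.2 = 'X' then p.1 :: pvXof l else pvXof l) from rfl,
        if_pos hX, if_pos hX, zero_add,
        show pvConvs (p.1 :: pvXof l) v = pvConvs (pvXof l) (pvConv p.1 v) from rfl]
    · show pvSteps l (pvStep p v) = _
      rw [ih (pvStep p v)]
      unfold pvStep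
      rw [if_neg hX]
      rw [show pvCof (p :: l) = (if p.2 = 'X' then 0 else p.1 * pvDv p.2) + pvCof l from rfl,
        show pvXof (p :: l) = (if p.2 = 'X' then p.1 :: pvXof l else pvXof l) from rfl,
        if_neg hX, if_neg hX, pvConvs_shift, pvShift_shift]

-- B's first pass, re-indexed over List.range
def pvScanStep (ms : List Int) (cs : List Char) (st : Int × List Int) (i : Nat) : Int × List Int :=
  if pvChAt cs i == 'X' then (st.1, st.2 ++ [pvCoeffAt ms i])
  else (PySem.Int.mod (st.1 + pvCoeffAt ms i * pvDv (pvChAt cs i)) 19, st.2)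

def pvScan (ms : List Int) (cs : List Char) : Int × List Int :=
  (List.range cs.length).foldl (pvScanStep ms cs) ((0 : Int), ([] : List Int))

def pvD0 : List Int := (1 : Int) :: List.replicate 18 0

-- one convolution step of B, with the per-wildcard count vector inlined
def pvConvStepB (dist : List Int) (c : Int) : List Int :=
  (List.range 19).map (fun (r : Nat) =>
    ((List.range 19).map (fun (s : Nat) => dist.getD s 0 *
      ((List.range 10).foldl (fun pos (d : Nat) => pvIncr pos (pvIdx (c * (d : Int))) 1) pvZ).getD
        (pvIdx ((r : Int) - (s : Int))) 0)).sum)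

def pvBAlt (ms : List Int) (cs : List Char) : List Int :=
  if cs.all (fun ch => ch == 'X' || ch == '0') then
    ((List.range 19).map (fun (r : Nat) =>
      ((pvScan ms cs).2.foldl pvConvStepB pvD0).getD (pvIdx ((r : Int) - (pvScan ms cs).1)) 0)).modify 0 (· - 1)
  else
    (List.range 19).map (fun (r : Nat) =>
      ((pvScan ms cs).2.foldl pvConvStepB pvD0).getD (pvIdx ((r : Int) - (pvScan ms cs).1)) 0)

def pvAEq (ms : List Int) (cs : List Char) : List Int :=
  if pvValidZero cs then
    (((List.range cs.length).foldl (pvBody ms cs) (pvDp0 cs.length)).getD cs.length []).modify 0 (· - 1)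
  else
    ((List.range cs.length).foldl (pvBody ms cs) (pvDp0 cs.length)).getD cs.length []

lemma pvA_eq (pattern : String) (ms : List Int) :
    process_an pattern ms = pvAEq ms pattern.toList := rfl

lemma pvScanEq (ms : List Int) (cs : List Char) :
    (PySem.List.enumerate cs 0).foldl (fun (st : Int × List Int) p =>
      if p.2 == 'X' then (st.1, st.2 ++ [(PySem.List.pyGet? ms p.1).getD 0])
      else (PySem.Int.mod (st.1 + ((PySem.List.pyGet? ms p.1).getD 0) *
              ((PySem.Int.ofStr? (String.ofList [p.2])).getD 0)) 19, st.2))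
      ((0 : Int), ([] : List Int))
    = pvScan ms cs := by
  rw [PySem.List.enumerate_eq_map_pyRange (d := ' '), List.foldl_map, PySem.List.pyRange_one,
    List.foldl_map]
  unfold pvScan
  have hlen : ((PySem.List.len cs : Int) - 0).toNat = cs.length := by
    rw [PySem.List.len_eq]; omega
  rw [hlen]
  refine PySem.List.foldl_congr_mem _ _ _ _ (fun st k _ => ?_)
  unfold pvScanStep pvChAt pvCoeffAt pvDv
  simp only [zero_add, PySem.List.pyGetD_natCast, PySem.List.pyGet?_natCast,
    List.getD_eq_getElem?_getD]

lemma pvB_eq (pattern : String) (ms : List Int) :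
    process_an_alt pattern ms = pvBAlt ms pattern.toList := by
  rw [pvBAlt, ← pvScanEq]
  rfl

lemma pvPfx_succ (ms : List Int) (cs : List Char) (k : Nat) :
    pvPfx ms cs (k + 1) = pvPfx ms cs k ++ [(pvCoeffAt ms k, pvChAt cs k)] := by
  unfold pvPfx
  rw [List.range_succ, List.map_append]
  rfl

lemma pvXof_append (l1 l2 : List (Int × Char)) : pvXof (l1 ++ l2) = pvXof l1 ++ pvXof l2 := by
  induction l1 with
  | nil => rfl
  | cons p l ih =>
    show pvXof (p :: (l ++ l2)) = _
    rw [show ∀ t, pvXof (p :: t) = if p.2 = 'X' then p.1 :: pvXof t else pvXof t from fun _ => rfl,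
      show pvXof (p :: l) = if p.2 = 'X' then p.1 :: pvXof l else pvXof l from rfl, ih]
    split <;> simp

lemma pvCof_append (l1 l2 : List (Int × Char)) : pvCof (l1 ++ l2) = pvCof l1 + pvCof l2 := by
  induction l1 with
  | nil => show pvCof l2 = pvCof [] + pvCof l2; show pvCof l2 = 0 + pvCof l2; omega
  | cons p l ih =>
    show pvCof (p :: (l ++ l2)) = _
    rw [show ∀ t, pvCof (p :: t) = (if p.2 = 'X' then 0 else p.1 * pvDv p.2) + pvCof t from fun _ => rfl,
      show pvCof (p :: l) = (if p.2 = 'X' then 0 else p.1 * pvDv p.2) + pvCof l from rfl, ih]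
    ring

lemma pvScanInv (ms : List Int) (cs : List Char) (k : Nat) :
    ((List.range k).foldl (pvScanStep ms cs) ((0 : Int), ([] : List Int))).2
        = pvXof (pvPfx ms cs k) ∧
    ((((List.range k).foldl (pvScanStep ms cs) ((0 : Int), ([] : List Int))).1 : Int) : ZMod 19)
        = ((pvCof (pvPfx ms cs k) : Int) : ZMod 19) := by
  induction k with
  | zero => constructor <;> rfl
  | succ k ih =>
    obtain ⟨ih2, ih1⟩ := ih
    rw [List.range_succ, List.foldl_append, List.foldl_cons, List.foldl_nil, pvPfx_succ,
      pvXof_append, pvCof_append]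
    set st := (List.range k).foldl (pvScanStep ms cs) ((0 : Int), ([] : List Int)) with hst
    unfold pvScanStep
    by_cases hX : (pvChAt cs k == 'X') = true
    · rw [if_pos hX]
      have h1 : pvXof [(pvCoeffAt ms k, pvChAt cs k)] = [pvCoeffAt ms k] := by
        show (if (pvCoeffAt ms k, pvChAt cs k).2 = 'X' then [(pvCoeffAt ms k, pvChAt cs k).1] else []) = _
        simp_all
      have h2 : pvCof [(pvCoeffAt ms k, pvChAt cs k)] = 0 := by
        show (if (pvCoeffAt ms k, pvChAt cs k).2 = 'X' then 0
          else (pvCoeffAt ms k, pvChAt cs k).1 * pvDv (pvCoeffAt ms k, pvChAt cs k).2) + pvCof [] = 0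
        simp_all [pvCof]
      rw [h1, h2, ih2]
      exact ⟨rfl, by rw [add_zero]; exact ih1⟩
    · rw [if_neg hX]
      have hX' : ¬ pvChAt cs k = 'X' := by simpa using hX
      have h1 : pvXof [(pvCoeffAt ms k, pvChAt cs k)] = [] := by
        show (if (pvCoeffAt ms k, pvChAt cs k).2 = 'X' then [(pvCoeffAt ms k, pvChAt cs k).1] else []) = _
        simp [hX']
      have h2 : pvCof [(pvCoeffAt ms k, pvChAt cs k)]
          = pvCoeffAt ms k * pvDv (pvChAt cs k) := by
        show (if (pvCoeffAt ms k, pvChAt cs k).2 = 'X' then 0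
          else (pvCoeffAt ms k, pvChAt cs k).1 * pvDv (pvCoeffAt ms k, pvChAt cs k).2) + pvCof [] = _
        simp [hX', pvCof]
      rw [h1, h2, List.append_nil, ih2]
      refine ⟨rfl, ?_⟩
      rw [pvCastMod]
      have hsplit : ((st.1 + pvCoeffAt ms k * pvDv (pvChAt cs k) : Int) : ZMod 19)
          = ((st.1 : Int) : ZMod 19) + ((pvCoeffAt ms k * pvDv (pvChAt cs k) : Int) : ZMod 19) := by
        push_cast
        ring
      rw [hsplit, ih1]
      push_cast
      ring

lemma pvGetD_map_range (f : Nat → Int) (j : Nat) (hj : j < 19) :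
    ((List.range 19).map f).getD j 0 = f j := by
  rw [List.getD_eq_getElem?_getD, List.getElem?_map, List.getElem?_range hj]
  rfl

lemma pvSumMapRange (f : Nat → Int) (n : Nat) :
    ((List.range n).map f).sum = ∑ i ∈ Finset.range n, f i := by
  induction n with
  | zero => simp
  | succ n ih =>
    rw [List.range_succ, Finset.sum_range_succ, List.map_append, List.sum_append, ih]
    simp

lemma pvConvStepB_toFun (c : Int) (dist : List Int) :
    pvToFun (pvConvStepB dist c) = pvConv c (pvToFun dist) := by
  funext t
  rw [pvToFun_cast_val]
  unfold pvConvStepB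
  rw [pvGetD_map_range _ _ (ZMod.val_lt t), pvSumMapRange]
  obtain ⟨hpl, hpf⟩ := pvFoldIncr 10 (fun d => pvIdx (c * (d : Int))) (fun d => pvIdx_lt _) 1
    pvZ (by simp [pvZ])
  have hget : ∀ s : Nat,
      ((List.range 10).foldl (fun pos (d : Nat) => pvIncr pos (pvIdx (c * (d : Int))) 1) pvZ).getD
        (pvIdx ((t.val : Int) - (s : Int))) 0
      = ∑ d ∈ Finset.range 10,
          (if ((c * (d : Int) : Int) : ZMod 19) = t - ((s : Nat) : ZMod 19) then 1 else 0) := by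
    intro s
    rw [pvGetD_idx, hpf, pvToFun_pvZ, zero_add]
    have hc : (((t.val : Int) - (s : Int) : Int) : ZMod 19) = t - ((s : Nat) : ZMod 19) := by
      push_cast
      rw [ZMod.natCast_zmod_val]
    rw [hc]
    refine Finset.sum_congr rfl (fun d _ => ?_)
    rw [pvIdx_cast]
  simp only [hget]
  simp only [Finset.mul_sum, mul_ite, mul_one, mul_zero]
  rw [Finset.sum_comm]
  unfold pvConv
  refine Finset.sum_congr rfl (fun d _ => ?_)
  have hcond : ∀ s : Nat, (((c * (d : Int) : Int) : ZMod 19) = t - ((s : Nat) : ZMod 19))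
      = (((s : Nat) : ZMod 19) = t - ((c * (d : Int) : Int) : ZMod 19)) := by
    intro s
    rw [eq_iff_iff]
    constructor
    · intro h; rw [eq_sub_iff_add_eq] at h ⊢; rw [← h]; ring
    · intro h; rw [eq_sub_iff_add_eq] at h ⊢; rw [← h]; ring
  simp only [hcond]
  rw [pvPick (fun s => dist.getD s 0)]
  rfl

lemma pvDistFold (ks : List Int) : ∀ dist : List Int,
    pvToFun (ks.foldl pvConvStepB dist) = pvConvs ks (pvToFun dist) := by
  induction ks with
  | nil => intro dist; rfl
  | cons k ks ih =>
    intro dist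
    rw [List.foldl_cons, ih (pvConvStepB dist k)]
    show pvConvs ks (pvToFun (pvConvStepB dist k)) = pvConvs ks (pvConv k (pvToFun dist))
    rw [pvConvStepB_toFun]

lemma pvRes_toFun (C : Int) (dist : List Int) :
    pvToFun ((List.range 19).map (fun (r : Nat) => dist.getD (pvIdx ((r : Int) - C)) 0))
      = pvShift C (pvToFun dist) := by
  funext t
  rw [pvToFun_cast_val, pvGetD_map_range _ _ (ZMod.val_lt t), pvGetD_idx]
  unfold pvShift
  have : (((t.val : Int) - C : Int) : ZMod 19) = t - (C : ZMod 19) := by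
    push_cast
    rw [ZMod.natCast_zmod_val]
  rw [this]

lemma pvShift_congr (c1 c2 : Int) (v : ZMod 19 → Int)
    (h : ((c1 : Int) : ZMod 19) = ((c2 : Int) : ZMod 19)) : pvShift c1 v = pvShift c2 v := by
  unfold pvShift
  rw [h]

lemma pvListEq (v w : List Int) (hv : v.length = 19) (hw : w.length = 19)
    (h : pvToFun v = pvToFun w) : v = w := by
  apply List.ext_getElem (by omega)
  intro j hj hj'
  have hj19 : j < 19 := by omega
  have hh := congrFun h ((j : Nat) : ZMod 19)
  rw [pvToFun_cast_val, pvToFun_cast_val, ZMod.val_cast_of_lt hj19,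
    List.getD_eq_getElem _ _ hj, List.getD_eq_getElem _ _ hj'] at hh
  exact hh

lemma pvValidZero_eq (cs : List Char) :
    pvValidZero cs = cs.all (fun ch => ch == 'X' || ch == '0') := by
  induction cs with
  | nil => rfl
  | cons c rest ih =>
    unfold pvValidZero
    rw [List.all_cons, ih]
    by_cases h1 : c = 'X' <;> by_cases h2 : c = '0' <;> simp [h1, h2]

lemma pvD0_toFun : pvToFun pvD0 = pvToFun pvRow0 := by
  have : ∀ t, pvToFun pvD0 t = pvToFun pvRow0 t := by decide
  exact funext this

-- the two cores agree
lemma pvCore_eq (ms : List Int) (cs : List Char) :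
    ((List.range cs.length).foldl (pvBody ms cs) (pvDp0 cs.length)).getD cs.length []
    = (List.range 19).map (fun (r : Nat) =>
        ((pvScan ms cs).2.foldl pvConvStepB pvD0).getD (pvIdx ((r : Int) - (pvScan ms cs).1)) 0) := by
  obtain ⟨hlen, hrows⟩ := pvTableInv ms cs cs.length (le_refl _)
  have hA : ((List.range cs.length).foldl (pvBody ms cs) (pvDp0 cs.length)).getD cs.length []
      = pvRowA ms cs cs.length := by
    rw [hrows cs.length (le_refl _), if_pos (le_refl _)]
  obtain ⟨hAl, hAf⟩ := pvRowA_spec ms cs cs.length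
  obtain ⟨hS2, hS1⟩ := pvScanInv ms cs cs.length
  have hS2' : (pvScan ms cs).2 = pvXof (pvPfx ms cs cs.length) := hS2
  have hS1' : (((pvScan ms cs).1 : Int) : ZMod 19) = ((pvCof (pvPfx ms cs cs.length) : Int) : ZMod 19) := hS1
  apply pvListEq
  · rw [hA]; exact hAl
  · simp
  · rw [hA, hAf, pvSteps_decompose, pvRes_toFun, pvDistFold, pvD0_toFun]
    rw [hS2']
    exact (pvShift_congr _ _ _ hS1').symm


-- ===== VERDICT (by name: the statement is the Claim_ definition above) =====
theorem process_an_spec : Claim_equal_process_an := by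
  unfold Claim_equal_process_an
  intro pattern mod2 _ _
  unfold Spec_process_an
  rw [pvA_eq, pvB_eq]
  unfold pvAEq pvBAlt
  rw [pvValidZero_eq, pvCore_eq]
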